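-- pv_equiv track=rewrite | github.com/Xiaohui009/aramus_summarization | util.py | get_heading_and_content
-- ===== SOURCE A (Python) =====
-- def get_heading_and_content(csv_row, file_type):
--     if file_type in ['pdf']:
--         heading = "" if csv_row[1] == 'None' or not csv_row[1] else csv_row[1]
--         content = "" if csv_row[2] == 'None' or not csv_row[2] else csv_row[2]
--     elif file_type in ['word']:
--         heading = ""
--         for idx in range(1, 5):
--             heading += "" if csv_row[idx] == 'None' or not csv_row[idx] else csv_row[idx]
--         content = "" if csv_row[5] == 'None' or not csv_row[5] else csv_row[5]
--     else:
--         heading = ""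
--         content = ""
--
--     return heading, content
-- ===== SOURCE B (Python) =====
-- # Slice-and-split rewrite: take one contiguous slice of the row, sanitize it in a
-- # single comprehension, then split it into heading (all but last cell, joined) and
-- # content (last cell); unknown types yield the empty slice and return ('','').
-- def get_heading_and_content(csv_row, file_type):
--     stop = 3 if file_type == 'pdf' else 6 if file_type == 'word' else 1
--     cells = ["" if c == 'None' else c for c in csv_row[1:stop]]
--     if not cells:
--         return "", ""
--     return "".join(cells[:-1]), cells[-1]
-- ===== Notes on version B (the rewrite author's own statement) =====
-- stated objective: simpler
-- what changed: Instead of per-index branches (with an accumulation loop for 'word'), B takes one contiguous slice csv_row[1:stop] determined by the file type, sanitizes it in a single comprehension, and splits it as join(all-but-last)/last, so heading and content fall out of one uniform pass over the slice.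
import Mathlib
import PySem

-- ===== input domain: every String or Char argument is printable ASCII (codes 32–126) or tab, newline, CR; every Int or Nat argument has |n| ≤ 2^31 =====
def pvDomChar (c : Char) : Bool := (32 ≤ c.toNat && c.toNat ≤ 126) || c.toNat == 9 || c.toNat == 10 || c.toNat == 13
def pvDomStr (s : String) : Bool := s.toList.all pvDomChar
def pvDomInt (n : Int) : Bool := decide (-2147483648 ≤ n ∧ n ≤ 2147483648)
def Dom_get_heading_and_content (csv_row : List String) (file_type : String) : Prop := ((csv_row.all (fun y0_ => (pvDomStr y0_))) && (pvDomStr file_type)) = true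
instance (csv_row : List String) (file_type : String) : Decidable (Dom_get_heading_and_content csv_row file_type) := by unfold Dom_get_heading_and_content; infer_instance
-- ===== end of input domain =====

-- One honest line: B replaces A's per-index branch chain (with a += loop for 'word') by
-- slicing out csv_row[1:stop], sanitizing the slice in one pass, and splitting it into
-- join(all-but-last) / last; simpler, one uniform pass.

-- ===== PORT A =====
-- literal transliteration of A: per-branch inline normalisation, 'word' loop over range(1,5);
-- indexing uses pyGetD (in range under Pre_, where Python does not raise)
def get_heading_and_content (csv_row : List String) (file_type : String) : String × String :=
  if file_type = "pdf" then
    let c1 := PySem.List.pyGetD csv_row 1 ""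
    let heading := if c1 = "None" ∨ c1 = "" then "" else c1
    let c2 := PySem.List.pyGetD csv_row 2 ""
    let content := if c2 = "None" ∨ c2 = "" then "" else c2
    (heading, content)
  else if file_type = "word" then
    let heading := (PySem.List.pyRange 1 5 1).foldl
      (fun h idx =>
        let v := PySem.List.pyGetD csv_row idx ""
        h ++ (if v = "None" ∨ v = "" then "" else v)) ""
    let c5 := PySem.List.pyGetD csv_row 5 ""
    let content := if c5 = "None" ∨ c5 = "" then "" else c5
    (heading, content)
  else
    ("", "")

-- ===== PORT B =====
-- slice csv_row[1:stop], sanitize in one map, split as join(cells[:-1]) / cells[-1]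
def get_heading_and_content_alt (csv_row : List String) (file_type : String) : String × String :=
  let stop : Int := if file_type = "pdf" then 3 else if file_type = "word" then 6 else 1
  let cells := (PySem.List.slice csv_row (some 1) (some stop)).map
    (fun c => if c = "None" then "" else c)
  if cells = [] then ("", "")
  else (PySem.Str.join "" (PySem.List.slice cells none (some (-1))),
        PySem.List.pyGetD cells (-1) "")

-- ===== PRECONDITION & SPEC =====
-- Pre_ excludes exactly the rows on which the Python A raises IndexError:
-- 'pdf' needs indices 1..2, 'word' needs indices 1..5.
def Pre_get_heading_and_content (csv_row : List String) (file_type : String) : Prop :=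
  (file_type = "pdf" → 3 ≤ csv_row.length) ∧ (file_type = "word" → 6 ≤ csv_row.length)
instance (csv_row : List String) (file_type : String) : Decidable (Pre_get_heading_and_content csv_row file_type) := by unfold Pre_get_heading_and_content; infer_instance

def pvWitness_get_heading_and_content : List String × String := (["id", "h", "c"], "pdf")

def Spec_get_heading_and_content (csv_row : List String) (file_type : String) (out : String × String) : Prop := out = get_heading_and_content_alt csv_row file_type
instance (csv_row : List String) (file_type : String) (out : String × String) : Decidable (Spec_get_heading_and_content csv_row file_type out) := by unfold Spec_get_heading_and_content; infer_instance

-- ===== CLAIM (what is proved, stated in full; the proofs are below) =====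
def Claim_equal_get_heading_and_content : Prop := ∀ (csv_row : List String) (file_type : String), Dom_get_heading_and_content csv_row file_type → Pre_get_heading_and_content csv_row file_type → Spec_get_heading_and_content csv_row file_type (get_heading_and_content csv_row file_type)

-- ===== LEMMAS AND PROOFS =====

-- list-shape helpers for the proofs
theorem pv_take3 (xs : List String) (h : 3 ≤ xs.length) :
    ∃ a b c t, xs = a :: b :: c :: t := by
  rcases xs with _ | ⟨a, _ | ⟨b, _ | ⟨c, t⟩⟩⟩ <;> simp at h ⊢
theorem pv_take6 (xs : List String) (h : 6 ≤ xs.length) :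
    ∃ a b c d e f t, xs = a :: b :: c :: d :: e :: f :: t := by
  rcases xs with _ | ⟨a, _ | ⟨b, _ | ⟨c, _ | ⟨d, _ | ⟨e, _ | ⟨f, t⟩⟩⟩⟩⟩⟩ <;> simp at h ⊢

-- ===== VERDICT (by name: the statement is the Claim_ definition above) =====
theorem get_heading_and_content_spec : Claim_equal_get_heading_and_content := by
  intro csv_row file_type _ hpre
  unfold Spec_get_heading_and_content get_heading_and_content get_heading_and_content_alt
  have hn : ∀ s : String, (if s = "None" ∨ s = "" then "" else s) = (if s = "None" then "" else s) := by
    intro s; by_cases h1 : s = "None" <;> by_cases h2 : s = "" <;> simp [h1, h2]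
  by_cases hp : file_type = "pdf"
  · subst hp
    obtain ⟨a, b, c, t, rfl⟩ := pv_take3 csv_row (hpre.1 rfl)
    have hs : PySem.List.slice (a :: b :: c :: t) (some ((1:Nat):Int)) (some ((3:Nat):Int))
        = ((a :: b :: c :: t).drop 1).take (3 - 1) := PySem.List.slice_natCast _ _ _
    simp only [Nat.cast_ofNat, Nat.cast_one] at hs
    have hg : ∀ x y : String, PySem.List.pyGetD ([x, y] : List String) (-1) "" = y := by
      intro x y; simp [pysem]
    simp only [String.reduceEq, reduceIte]
    rw [hs]
    simp only [pysem, hn, List.drop, List.take, List.map, hg]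
    simp [PySem.Str.join, PySem.Chars.join, List.intercalate, ← String.toList_inj]
  · by_cases hw : file_type = "word"
    · subst hw
      obtain ⟨a, b, c, d, e, f, t, rfl⟩ := pv_take6 csv_row (hpre.2 rfl)
      have hs : PySem.List.slice (a :: b :: c :: d :: e :: f :: t)
            (some ((1:Nat):Int)) (some ((6:Nat):Int))
          = ((a :: b :: c :: d :: e :: f :: t).drop 1).take (6 - 1) :=
        PySem.List.slice_natCast _ _ _
      simp only [Nat.cast_ofNat, Nat.cast_one] at hs
      have hr : PySem.List.pyRange 1 5 1 = [1, 2, 3, 4] := by decide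
      have hg : ∀ v w x y z : String,
          PySem.List.pyGetD ([v, w, x, y, z] : List String) (-1) "" = z := by
        intro v w x y z; simp [pysem]
      simp only [String.reduceEq, reduceIte]
      rw [hs, hr]
      simp only [pysem, hn, List.drop, List.take, List.map, List.foldl, hg]
      simp [PySem.Str.join, PySem.Chars.join, List.intercalate, ← String.toList_inj]
    · have hs : PySem.List.slice csv_row (some ((1:Nat):Int)) (some ((1:Nat):Int))
          = (csv_row.drop 1).take (1 - 1) := PySem.List.slice_natCast _ _ _
      simp only [Nat.cast_one] at hs
      simp [hp, hw, hs]
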